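-- pv_equiv track=rewrite | github.com/kudoas/competitive-programming-solutions | Codility/Anagram/main.py | solution
-- ===== SOURCE A (Python) =====
-- from collections import Counter
-- import math
--
-- MOD = 10**9+7
--
-- vowels = ['A', 'O', 'I', 'E', 'U']
--
-- def solution(S: 'string') -> 'number':
--     v_cnt = 0
--     c_cnt = 0
--     ans = 1
--     c = Counter(list(S))
--     for s in S:
--         if s in vowels:
--             v_cnt += 1
--         else:
--             c_cnt += 1
--     if c_cnt - v_cnt == 1 or c_cnt - v_cnt == 0:
--         ans *= math.factorial(c_cnt)
--         ans *= math.factorial(v_cnt)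
--         for v in c.values():
--             if v != 0:
--                 ans //= math.factorial(v)
--         ans %= MOD
--         return ans
--     else:
--         return 0
-- ===== SOURCE B (Python) =====
-- import math
--
-- MOD = 10**9 + 7
--
-- VOWELS = 'AOIEU'
--
-- def _bump(ch, run, v, c, va, ca):
--     # close a run of `run` copies of ch: extend its class by the run and
--     # multiply that class's arrangement count by C(new_total, run)
--     if ch in VOWELS:
--         v += run
--         va *= math.comb(v, run)
--     else:
--         c += run
--         ca *= math.comb(c, run)
--     return v, c, va, ca
--
-- def solution(S: 'string') -> 'number':
--     v = c = 0
--     va = ca = 1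
--     prev = None
--     run = 0
--     for ch in sorted(S):
--         if ch == prev:
--             run += 1
--         else:
--             if run:
--                 v, c, va, ca = _bump(prev, run, v, c, va, ca)
--             prev, run = ch, 1
--     if run:
--         v, c, va, ca = _bump(prev, run, v, c, va, ca)
--     if c - v in (0, 1):
--         return va * ca % MOD
--     return 0
-- ===== Notes on version B (the rewrite author's own statement) =====
-- stated objective: alternative
-- what changed: B drops the Counter and all factorial divisions: it sorts the string, scans the sorted characters detecting runs of equal characters, and builds each class's arrangement count as a product of binomial coefficients comb(running_class_total, run_length), so the multinomials are assembled multiplicatively with math.comb instead of dividing a big factorial product.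
import Mathlib
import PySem

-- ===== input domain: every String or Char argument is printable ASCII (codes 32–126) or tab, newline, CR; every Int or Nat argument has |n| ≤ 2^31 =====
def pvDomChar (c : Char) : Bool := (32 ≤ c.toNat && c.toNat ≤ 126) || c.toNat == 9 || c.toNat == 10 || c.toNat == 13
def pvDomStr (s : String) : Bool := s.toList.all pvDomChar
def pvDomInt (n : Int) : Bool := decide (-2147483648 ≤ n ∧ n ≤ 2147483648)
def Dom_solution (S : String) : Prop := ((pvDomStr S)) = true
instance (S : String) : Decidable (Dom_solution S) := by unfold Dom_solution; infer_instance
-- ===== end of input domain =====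

-- B abandons A's Counter-and-factorial-division scheme: it sorts the string, scans the sorted
-- characters detecting runs of equal characters, and builds each class's arrangement count as a
-- product of binomial coefficients C(running class total, run length) — no division at all
-- (objective: alternative algorithm; same exact value).

def pyMOD : Int := 1000000007
def vowelsA : List Char := ['A', 'O', 'I', 'E', 'U']
-- math.factorial; in both programs it is only applied to the nonnegative counts, where this is exact
def pyFact (n : Int) : Int := ((n.toNat).factorial : Int)

-- ===== PORT A =====
def solution (S : String) : Int :=
  let c := PySem.Dict.counter S.toList
  let vc := S.toList.foldl (fun (p : Int × Int) s =>
      if s ∈ vowelsA then (p.1 + 1, p.2) else (p.1, p.2 + 1)) (0, 0)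
  if vc.2 - vc.1 = 1 ∨ vc.2 - vc.1 = 0 then
    let ans : Int := 1 * pyFact vc.2 * pyFact vc.1
    let ans := c.values.foldl (fun a v => if v ≠ 0 then PySem.Int.floordiv a (pyFact v) else a) ans
    PySem.Int.mod ans pyMOD
  else 0

-- ===== PORT B =====
-- 'ch in VOWELS' on a 1-character string is membership of one of its characters
def vowelsB : List Char := ['A', 'O', 'I', 'E', 'U']
-- math.comb; applied only to nonnegative arguments in B
def pyComb (n k : Int) : Int := ((n.toNat).choose (k.toNat) : Int)

-- _bump: close a run of `run` copies of ch; state is (v, c, va, ca)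
def bumpB (ch : Char) (run : Int) (st : Int × Int × Int × Int) : Int × Int × Int × Int :=
  if ch ∈ vowelsB then
    (st.1 + run, st.2.1, st.2.2.1 * pyComb (st.1 + run) run, st.2.2.2)
  else
    (st.1, st.2.1 + run, st.2.2.1, st.2.2.2 * pyComb (st.2.1 + run) run)

-- loop body: state is (prev, run, (v, c, va, ca)); prev = none ports Python's prev = None
def stepB (acc : Option Char × Int × (Int × Int × Int × Int)) (ch : Char) :
    Option Char × Int × (Int × Int × Int × Int) :=
  if acc.1 = some ch then (acc.1, acc.2.1 + 1, acc.2.2)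
  else
    (some ch, 1,
      if acc.2.1 ≠ 0 then (acc.1.elim acc.2.2 (fun p => bumpB p acc.2.1 acc.2.2)) else acc.2.2)

-- the trailing 'if run: _bump(prev, …)' after the loop
def finishB (r : Option Char × Int × (Int × Int × Int × Int)) : Int × Int × Int × Int :=
  if r.2.1 ≠ 0 then (r.1.elim r.2.2 (fun p => bumpB p r.2.1 r.2.2)) else r.2.2

def solution_alt (S : String) : Int :=
  let r := (PySem.List.sorted S.toList (fun c => c) false).foldl stepB (none, 0, (0, 0, 1, 1))
  let st := finishB r
  if st.2.1 - st.1 = 0 ∨ st.2.1 - st.1 = 1 then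
    PySem.Int.mod (st.2.2.1 * st.2.2.2) pyMOD
  else 0

-- ===== PRECONDITION & SPEC =====
def Spec_solution (S : String) (out : Int) : Prop := out = solution_alt S
instance (S : String) (out : Int) : Decidable (Spec_solution S out) := by unfold Spec_solution; infer_instance

-- ===== CLAIM (what is proved, stated in full; the proofs are below) =====
def Claim_equal_solution : Prop := ∀ (S : String), Dom_solution S → Spec_solution S (solution S)

-- ===== LEMMAS AND PROOFS =====

-- vowel test as a Bool predicate, shared by both sides in the proofs
def pv (k : Char) : Bool := decide (k ∈ vowelsA)

-- A's counting loop
theorem pair_fold (l : List Char) (a b : Int) :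
    l.foldl (fun (p : Int × Int) s =>
      if s ∈ vowelsA then (p.1 + 1, p.2) else (p.1, p.2 + 1)) (a, b)
    = (a + (l.countP pv : Int), b + (l.countP (fun k => !pv k) : Int)) := by
  induction l generalizing a b with
  | nil => simp
  | cons x l ih =>
    by_cases h : x ∈ vowelsA <;>
      simp [h, ih, pv] <;> ring

-- product of factorials of a list divides the factorial of its sum
theorem prodfact (ns : List Nat) : (ns.map Nat.factorial).prod ∣ ns.sum.factorial := by
  induction ns with
  | nil => simp
  | cons n ns ih =>
    simp only [List.map_cons, List.prod_cons, List.sum_cons]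
    exact dvd_trans (mul_dvd_mul_left _ ih) (Nat.factorial_mul_factorial_dvd_factorial_add n ns.sum)

-- A's division loop computes the two exact quotients
theorem afold (l : List Char) (ks : List Char) (a b : Nat)
    (hnz : ∀ k ∈ ks, l.count k ≠ 0)
    (hva : (((ks.filter pv).map l.count).map Nat.factorial).prod ∣ a)
    (hcb : (((ks.filter (fun k => !pv k)).map l.count).map Nat.factorial).prod ∣ b) :
    (ks.map (fun k => (l.count k : Int))).foldl
      (fun x v => if v ≠ 0 then PySem.Int.floordiv x (pyFact v) else x) (((a * b : Nat) : Int))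
    = (((a / (((ks.filter pv).map l.count).map Nat.factorial).prod)
        * (b / (((ks.filter (fun k => !pv k)).map l.count).map Nat.factorial).prod) : Nat) : Int) := by
  induction ks generalizing a b with
  | nil => simp
  | cons k ks ih =>
    have hcnt : l.count k ≠ 0 := hnz k (List.mem_cons_self ..)
    have hstep : ((l.count k : Int)) ≠ 0 := Int.natCast_ne_zero.mpr hcnt
    simp only [List.map_cons, List.foldl_cons, if_pos hstep]
    have hdiv : PySem.Int.floordiv ((a * b : Nat) : Int) (pyFact (l.count k : Int))
        = (((a * b) / (l.count k).factorial : Nat) : Int) := by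
      have h1 : pyFact ((l.count k : Int)) = (((l.count k).factorial : Nat) : Int) := by
        simp [pyFact]
      rw [h1, PySem.Int.floordiv_natCast]
    rw [hdiv]
    cases hp : pv k
    · -- consonant: the head factorial divides b
      have hb1 : (l.count k).factorial ∣ b := by
        have h := hcb
        simp only [List.filter_cons, hp] at h
        exact dvd_trans (Dvd.intro _ rfl) h
      have hb2 : (((ks.filter (fun k => !pv k)).map l.count).map Nat.factorial).prod
          ∣ b / (l.count k).factorial := by
        rw [Nat.dvd_div_iff_mul_dvd hb1]
        simpa [hp] using hcb
      have hmul : (a * b) / (l.count k).factorial = a * (b / (l.count k).factorial) :=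
        Nat.mul_div_assoc a hb1
      rw [hmul, ih a (b / (l.count k).factorial) (fun j hj => hnz j (List.mem_cons_of_mem _ hj))
            (by simpa [hp] using hva) hb2]
      simp [hp, Nat.div_div_eq_div_mul]
    · -- vowel: the head factorial divides a
      have ha1 : (l.count k).factorial ∣ a := by
        have h := hva
        simp only [List.filter_cons, hp] at h
        exact dvd_trans (Dvd.intro _ rfl) h
      have ha2 : (((ks.filter pv).map l.count).map Nat.factorial).prod
          ∣ a / (l.count k).factorial := by
        rw [Nat.dvd_div_iff_mul_dvd ha1]
        simpa [hp] using hva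
      have hmul : (a * b) / (l.count k).factorial = (a / (l.count k).factorial) * b := by
        rw [mul_comm, Nat.mul_div_assoc b ha1, mul_comm]
      rw [hmul, ih (a / (l.count k).factorial) b (fun j hj => hnz j (List.mem_cons_of_mem _ hj)) ha2
            (by simpa [hp] using hcb)]
      simp [hp, Nat.div_div_eq_div_mul]

-- one more list element raises the multiplicity sum by the key's own multiplicity
theorem sum_map_count_cons (x : Char) (l ks : List Char) :
    (ks.map (x :: l).count).sum = (ks.map l.count).sum + ks.count x := by
  induction ks with
  | nil => simp
  | cons j ks ihk =>
    rw [List.map_cons, List.sum_cons, ihk, List.count_cons, List.count_cons]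
    by_cases hj : j = x
    · subst hj
      simp
      omega
    · have hj' : x ≠ j := fun h => hj h.symm
      simp [hj, hj']
      omega

-- sum of multiplicities over a duplicate-free key list counts the members
theorem countsum (l ks : List Char) (hnd : ks.Nodup) :
    (ks.map l.count).sum = l.countP (fun x => decide (x ∈ ks)) := by
  induction l with
  | nil => simp
  | cons x l ih =>
    rw [sum_map_count_cons, ih, List.countP_cons]
    by_cases hx : x ∈ ks
    · rw [List.count_eq_one_of_mem hnd hx]; simp [hx]
    · rw [List.count_eq_zero_of_not_mem hx]; simp [hx]

-- abbreviations for the vowel/consonant occurrence counts and factorial denominators of a string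
def Vc (l : List Char) : Nat := l.countP pv
def Cc (l : List Char) : Nat := l.countP (fun k => !pv k)
def Vd (l : List Char) : Nat :=
  ((((PySem.Set.ofList l).filter pv).map l.count).map Nat.factorial).prod
def Cd (l : List Char) : Nat :=
  ((((PySem.Set.ofList l).filter (fun k => !pv k)).map l.count).map Nat.factorial).prod

theorem hVs (l : List Char) :
    (((PySem.Set.ofList l).filter pv).map l.count).sum = Vc l := by
  rw [countsum l _ ((PySem.Set.nodup_ofList l).filter _)]
  apply List.countP_congr
  intro x hx
  simp [List.mem_filter, PySem.Set.mem_ofList, hx]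

theorem hCs (l : List Char) :
    (((PySem.Set.ofList l).filter (fun k => !pv k)).map l.count).sum = Cc l := by
  rw [countsum l _ ((PySem.Set.nodup_ofList l).filter _)]
  apply List.countP_congr
  intro x hx
  simp [List.mem_filter, PySem.Set.mem_ofList, hx]

theorem hnz (l : List Char) : ∀ k ∈ PySem.Set.ofList l, l.count k ≠ 0 := by
  intro k hk
  rw [PySem.Set.mem_ofList] at hk
  simp [List.count_eq_zero, hk]

theorem A_eval (S : String) :
    solution S =
      if ((Cc S.toList : Int) - (Vc S.toList : Int) = 1 ∨ (Cc S.toList : Int) - (Vc S.toList : Int) = 0) then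
        PySem.Int.mod ((((Vc S.toList).factorial / Vd S.toList) * ((Cc S.toList).factorial / Cd S.toList) : Nat) : Int) pyMOD
      else 0 := by
  unfold solution
  rw [pair_fold]
  simp only [zero_add, PySem.Dict.values]
  rw [PySem.Dict.items_counter]
  have hmap : ((PySem.Set.ofList S.toList).map (fun k => (k, (S.toList.count k : Int)))).map (fun p => p.2)
      = (PySem.Set.ofList S.toList).map (fun k => (S.toList.count k : Int)) := by
    simp
  rw [hmap]
  have h0 : (1 : Int) * pyFact ((Cc S.toList : Int)) * pyFact ((Vc S.toList : Int))
      = ((((Vc S.toList).factorial * (Cc S.toList).factorial : Nat)) : Int) := by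
    simp [pyFact]
    ring
  have hva : ((((PySem.Set.ofList S.toList).filter pv).map S.toList.count).map Nat.factorial).prod
      ∣ (Vc S.toList).factorial := hVs S.toList ▸ prodfact _
  have hcb : ((((PySem.Set.ofList S.toList).filter (fun k => !pv k)).map S.toList.count).map Nat.factorial).prod
      ∣ (Cc S.toList).factorial := hCs S.toList ▸ prodfact _
  simp only [Vc, Cc, Vd, Cd] at h0 hva hcb ⊢
  rw [h0, afold S.toList _ _ _ (hnz S.toList) hva hcb]

-- ---------- B side: run-length encoding of a list ----------

def rle : List Char → List (Char × Nat)
  | [] => []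
  | x :: xs =>
    match rle xs with
    | [] => [(x, 1)]
    | (y, k) :: r => if x = y then (x, k + 1) :: r else (x, 1) :: (y, k) :: r

theorem rle_cons (x : Char) (xs : List Char) :
    rle (x :: xs) =
      match rle xs with
      | [] => [(x, 1)]
      | (y, k) :: r => if x = y then (x, k + 1) :: r else (x, 1) :: (y, k) :: r := rfl

theorem rle_head (x : Char) (xs : List Char) :
    ∃ k r, rle (x :: xs) = (x, k) :: r := by
  unfold rle
  match h : rle xs with
  | [] => exact ⟨1, [], rfl⟩
  | (y, k) :: r =>
    by_cases hxy : x = y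
    · exact ⟨k + 1, r, by simp [hxy]⟩
    · exact ⟨1, (y, k) :: r, by simp [hxy]⟩

theorem rle_flat (l : List Char) :
    (rle l).flatMap (fun p => List.replicate p.2 p.1) = l := by
  induction l with
  | nil => rfl
  | cons x xs ih =>
    unfold rle
    match h : rle xs with
    | [] =>
      rw [h] at ih
      simp at ih
      simp [← ih]
    | (y, k) :: r =>
      rw [h] at ih
      by_cases hxy : x = y
      · subst hxy
        simp only [if_pos trivial, List.flatMap_cons] at ih ⊢
        rw [List.replicate_succ, List.cons_append, ih]
      · simp only [if_neg hxy, List.flatMap_cons] at ih ⊢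
        simp [ih]

theorem rle_pos (l : List Char) : ∀ p ∈ rle l, 1 ≤ p.2 := by
  induction l with
  | nil => simp [rle]
  | cons x xs ih =>
    unfold rle
    match h : rle xs with
    | [] => simp
    | (y, k) :: r =>
      rw [h] at ih
      by_cases hxy : x = y
      · simp only [if_pos hxy]
        intro p hp
        rcases List.mem_cons.mp hp with hp | hp
        · subst hp; omega
        · exact ih p (List.mem_cons_of_mem _ hp)
      · simp only [if_neg hxy]
        intro p hp
        rcases List.mem_cons.mp hp with hp | hp
        · subst hp; omega
        · exact ih p hp

theorem mem_rle_keys (l : List Char) (a : Char) :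
    a ∈ (rle l).map Prod.fst ↔ a ∈ l := by
  conv_rhs => rw [← rle_flat l]
  simp only [List.mem_flatMap, List.mem_map]
  constructor
  · rintro ⟨p, hp, rfl⟩
    exact ⟨p, hp, List.mem_replicate.mpr ⟨by have := rle_pos l p hp; omega, rfl⟩⟩
  · rintro ⟨p, hp, hm⟩
    exact ⟨p, hp, ((List.mem_replicate.mp hm).2).symm⟩

theorem rle_keys_lt (l : List Char) (hs : l.Pairwise (· ≤ ·)) :
    ((rle l).map Prod.fst).Pairwise (· < ·) := by
  induction l with
  | nil => simp [rle]
  | cons x xs ih =>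
    rw [List.pairwise_cons] at hs
    obtain ⟨hx, hxs⟩ := hs
    have ih := ih hxs
    unfold rle
    match h : rle xs with
    | [] => simp
    | (y, k) :: r =>
      rw [h] at ih
      have hy : y ∈ xs := (mem_rle_keys xs y).mp (by rw [h]; simp)
      have hxy_le : x ≤ y := hx y hy
      rw [List.map_cons, List.pairwise_cons] at ih
      by_cases hxy : x = y
      · subst hxy
        simp only [if_pos trivial, List.map_cons, List.pairwise_cons]
        exact ih
      · simp only [if_neg hxy, List.map_cons, List.pairwise_cons]
        refine ⟨?_, ih⟩
        intro z hz
        rcases List.mem_cons.mp hz with hz | hz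
        · subst hz; exact lt_of_le_of_ne hxy_le hxy
        · exact lt_trans (lt_of_le_of_ne hxy_le hxy) (ih.1 z hz)

-- count of a over a flattened run list
theorem count_flat (a : Char) (L : List (Char × Nat)) :
    (L.flatMap (fun p => List.replicate p.2 p.1)).count a
      = (L.map (fun q => if q.1 = a then q.2 else 0)).sum := by
  induction L with
  | nil => rfl
  | cons q L ih =>
    simp only [List.flatMap_cons, List.count_append, List.map_cons, List.sum_cons, ih,
      List.count_replicate]
    by_cases h : q.1 = a <;> simp [h]

theorem sum_pick (L : List (Char × Nat)) (p : Char × Nat)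
    (hnd : (L.map Prod.fst).Nodup) (hp : p ∈ L) :
    (L.map (fun q => if q.1 = p.1 then q.2 else 0)).sum = p.2 := by
  induction L with
  | nil => simp at hp
  | cons q L ih =>
    rw [List.map_cons, List.nodup_cons] at hnd
    rcases List.mem_cons.mp hp with hp | hp
    · subst hp
      have hz : (L.map (fun q => if q.1 = p.1 then q.2 else 0)).sum = 0 := by
        apply List.sum_eq_zero
        intro x hx
        obtain ⟨r, hr, hrx⟩ := List.mem_map.mp hx
        have : r.1 ≠ p.1 := fun h => hnd.1 (h ▸ List.mem_map_of_mem hr)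
        simp [this] at hrx
        omega
      simp [hz]
    · have hq : q.1 ≠ p.1 := fun h => hnd.1 (h ▸ List.mem_map_of_mem hp)
      simp [hq, ih hnd.2 hp]

theorem rle_count (l : List Char) (hs : l.Pairwise (· ≤ ·)) :
    ∀ p ∈ rle l, l.count p.1 = p.2 := by
  intro p hp
  have hnd : ((rle l).map Prod.fst).Nodup := (rle_keys_lt l hs).nodup
  conv_lhs => rw [← rle_flat l]
  rw [count_flat, sum_pick _ p hnd hp]

-- countP over a flattened run list
theorem countP_flat (f : Char → Bool) (L : List (Char × Nat)) :
    (L.flatMap (fun p => List.replicate p.2 p.1)).countP f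
      = ((L.filter (fun q => f q.1)).map Prod.snd).sum := by
  induction L with
  | nil => rfl
  | cons q L ih =>
    simp only [List.flatMap_cons, List.countP_append, List.filter_cons, ih]
    have hrep : (List.replicate q.2 q.1).countP f = if f q.1 then q.2 else 0 := by
      induction q.2 with
      | zero => simp
      | succ n ihn =>
        rw [List.replicate_succ, List.countP_cons]
        by_cases h : f q.1 <;> simp [h, ihn]
    rw [hrep]
    by_cases h : f q.1 <;> simp [h]

-- ---------- the fold of B's loop equals a fold over the run-length encoding ----------

def bumpRun (st : Int × Int × Int × Int) (q : Char × Nat) : Int × Int × Int × Int :=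
  bumpB q.1 (q.2 : Int) st

theorem rle_replicate (p : Char) (r : Nat) (hr : 1 ≤ r) :
    rle (List.replicate r p) = [(p, r)] := by
  induction r with
  | zero => omega
  | succ n ih =>
    by_cases hn : 1 ≤ n
    · rw [List.replicate_succ]
      unfold rle
      rw [ih hn]
      simp
    · have : n = 0 := by omega
      subst this
      rfl

theorem rle_replicate_append (p x : Char) (T : List Char) (r : Nat) (hr : 1 ≤ r)
    (hne : x ≠ p) :
    rle (List.replicate r p ++ x :: T) = (p, r) :: rle (x :: T) := by
  induction r with
  | zero => omega
  | succ n ih =>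
    by_cases hn : 1 ≤ n
    · rw [List.replicate_succ, List.cons_append]
      unfold rle
      rw [ih hn]
      simp
      rfl
    · have : n = 0 := by omega
      subst this
      simp only [List.replicate_succ, List.replicate_zero, List.nil_append, List.cons_append,
        List.nil_append]
      obtain ⟨k, rr, hk⟩ := rle_head x T
      have hpx : p ≠ x := fun h => hne h.symm
      rw [rle_cons, hk]
      simp [hpx]

theorem sim_aux (T : List Char) (p : Char) (r : Nat) (hr : 1 ≤ r)
    (st : Int × Int × Int × Int) :
    finishB (T.foldl stepB (some p, (r : Int), st))
      = (rle (List.replicate r p ++ T)).foldl bumpRun st := by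
  induction T generalizing p r st with
  | nil =>
    simp only [List.foldl_nil, List.append_nil]
    rw [rle_replicate p r hr]
    have hrne : ((r : Int)) ≠ 0 := by exact_mod_cast Nat.one_le_iff_ne_zero.mp hr
    simp only [finishB, if_pos hrne, Option.elim]
    simp [bumpRun]
  | cons x T ih =>
    by_cases hx : x = p
    · subst hx
      have hstep : stepB (some x, (r : Int), st) x = (some x, ((r + 1 : Nat) : Int), st) := by
        simp [stepB]
      rw [List.foldl_cons, hstep, ih x (r + 1) (by omega) st]
      have : List.replicate r x ++ x :: T = List.replicate (r + 1) x ++ T := by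
        rw [List.replicate_succ']
        simp
      rw [this]
    · have hrne : ((r : Int)) ≠ 0 := by exact_mod_cast Nat.one_le_iff_ne_zero.mp hr
      have hne2 : some p ≠ some x := by
        intro h
        exact hx (Option.some.inj h).symm
      have hstep : stepB (some p, (r : Int), st) x
          = (some x, ((1 : Nat) : Int), bumpB p r st) := by
        simp only [stepB, if_neg hne2, if_pos hrne]
        simp
      rw [List.foldl_cons, hstep, ih x 1 le_rfl (bumpB p r st),
        rle_replicate_append p x T r hr hx, List.foldl_cons]
      rfl

theorem sim (T : List Char) :
    finishB (T.foldl stepB (none, 0, (0, 0, 1, 1)))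
      = (rle T).foldl bumpRun (0, 0, 1, 1) := by
  cases T with
  | nil => rfl
  | cons x T =>
    have hstep : stepB (none, 0, ((0 : Int), (0 : Int), (1 : Int), (1 : Int))) x
        = (some x, ((1 : Nat) : Int), (0, 0, 1, 1)) := by
      simp [stepB]
    rw [List.foldl_cons, hstep, sim_aux T x 1 le_rfl]
    simp

-- ---------- the run fold splits into two per-class binomial chains ----------

def combStep (p : Nat × Nat) (k : Nat) : Nat × Nat := (p.1 + k, p.2 * Nat.choose (p.1 + k) k)

theorem mem_vowelsB_iff (k : Char) : k ∈ vowelsB ↔ pv k = true := by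
  simp [vowelsB, pv, vowelsA]

theorem bump_split (L : List (Char × Nat)) (v c va ca : Nat) :
    L.foldl bumpRun ((v : Int), (c : Int), (va : Int), (ca : Int))
      = ( (((((L.filter (fun q => pv q.1)).map Prod.snd).foldl combStep (v, va)).1 : Nat) : Int),
          (((((L.filter (fun q => !pv q.1)).map Prod.snd).foldl combStep (c, ca)).1 : Nat) : Int),
          (((((L.filter (fun q => pv q.1)).map Prod.snd).foldl combStep (v, va)).2 : Nat) : Int),
          (((((L.filter (fun q => !pv q.1)).map Prod.snd).foldl combStep (c, ca)).2 : Nat) : Int) ) := by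
  induction L generalizing v c va ca with
  | nil => simp
  | cons q L ih =>
    rw [List.foldl_cons]
    cases h : pv q.1
    · have hmem : ¬ q.1 ∈ vowelsB := fun hm => by
        rw [mem_vowelsB_iff] at hm; rw [hm] at h; cases h
      have hb : bumpRun ((v : Int), (c : Int), (va : Int), (ca : Int)) q
          = (((v : Nat) : Int), (((c + q.2 : Nat)) : Int), ((va : Nat) : Int),
             (((ca * Nat.choose (c + q.2) q.2 : Nat)) : Int)) := by
        simp only [bumpRun, bumpB, if_neg hmem, pyComb]
        have h1 : (((c : Int)) + ((q.2 : Nat) : Int)).toNat = c + q.2 := by omega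
        have h2 : (((q.2 : Nat) : Int)).toNat = q.2 := by omega
        rw [h1, h2]
        push_cast
        rfl
      rw [hb, ih v (c + q.2) va (ca * Nat.choose (c + q.2) q.2)]
      simp [List.filter_cons, h, combStep]
    · have hmem : q.1 ∈ vowelsB := (mem_vowelsB_iff q.1).mpr h
      have hb : bumpRun ((v : Int), (c : Int), (va : Int), (ca : Int)) q
          = ((((v + q.2 : Nat)) : Int), ((c : Nat) : Int),
             (((va * Nat.choose (v + q.2) q.2 : Nat)) : Int), ((ca : Nat) : Int)) := by
        simp only [bumpRun, bumpB, if_pos hmem, pyComb]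
        have h1 : (((v : Int)) + ((q.2 : Nat) : Int)).toNat = v + q.2 := by omega
        have h2 : (((q.2 : Nat) : Int)).toNat = q.2 := by omega
        rw [h1, h2]
        push_cast
        rfl
      rw [hb, ih (v + q.2) c (va * Nat.choose (v + q.2) q.2) ca]
      simp [List.filter_cons, h, combStep]

-- the binomial chain computes the multinomial: acc * t! * ∏ k! = a * (t + Σk)!
theorem combFold_spec (ks : List Nat) (t a : Nat) :
    (ks.foldl combStep (t, a)).1 = t + ks.sum ∧
    (ks.foldl combStep (t, a)).2 * t.factorial * (ks.map Nat.factorial).prod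
      = a * (t + ks.sum).factorial := by
  induction ks generalizing t a with
  | nil => simp
  | cons k ks ih =>
    simp only [List.foldl_cons, combStep, List.sum_cons, List.map_cons, List.prod_cons]
    obtain ⟨ih1, ih2⟩ := ih (t + k) (a * Nat.choose (t + k) k)
    constructor
    · rw [ih1]; omega
    · have hC : 0 < Nat.choose (t + k) k := Nat.choose_pos (Nat.le_add_left k t)
      apply Nat.eq_of_mul_eq_mul_right hC
      have key : Nat.choose (t + k) k * t.factorial * k.factorial = (t + k).factorial :=
        Nat.add_choose_mul_factorial_mul_factorial t k
      calc (ks.foldl combStep (t + k, a * (t + k).choose k)).2 * t.factorial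
              * (k.factorial * (ks.map Nat.factorial).prod) * Nat.choose (t + k) k
          = (ks.foldl combStep (t + k, a * (t + k).choose k)).2 * (t + k).factorial
              * (ks.map Nat.factorial).prod := by rw [← key]; ring
        _ = a * Nat.choose (t + k) k * (t + k + ks.sum).factorial := ih2
        _ = a * (t + (k + ks.sum)).factorial * Nat.choose (t + k) k := by
              rw [← add_assoc]; ring

-- ---------- putting the B side together ----------

-- filtering on the key then projecting commutes with projecting then filtering
theorem filt_map (g : Char → Bool) (f : Char → Nat) (L : List (Char × Nat)) :
    ((L.filter (fun q => g q.1)).map (fun q => f q.1)) = ((L.map Prod.fst).filter g).map f := by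
  induction L with
  | nil => rfl
  | cons q L ih =>
    simp only [List.filter_cons, List.map_cons]
    cases h : g q.1 <;> simp [h, ih]

-- one class's run lengths of the sorted list: their sum and their factorial product,
-- expressed through A's quantities (stated for an arbitrary Bool predicate g)
theorem class_runs (l : List Char) (g : Char → Bool) :
    (let T := PySem.List.sorted l (fun c => c) false
     let lens := ((rle T).filter (fun q => g q.1)).map Prod.snd
     lens.sum = l.countP g ∧
     (lens.map Nat.factorial).prod
       = ((((PySem.Set.ofList l).filter g).map l.count).map Nat.factorial).prod) := by
  intro T lens
  have hperm : T.Perm l := PySem.List.sorted_perm ..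
  have hpair : T.Pairwise (· ≤ ·) := PySem.List.sorted_pairwise ..
  have hnd : ((rle T).map Prod.fst).Nodup := (rle_keys_lt T hpair).nodup
  constructor
  · have h1 : T.countP g = lens.sum := by
      conv_lhs => rw [← rle_flat T]
      exact countP_flat g (rle T)
    rw [← h1, hperm.countP_eq]
  · have hsnd : lens = ((rle T).filter (fun q => g q.1)).map (fun q => l.count q.1) := by
      apply List.map_congr_left
      intro q hq
      have hq' : q ∈ rle T := List.mem_filter.mp hq |>.1
      rw [← rle_count T hpair q hq', hperm.count_eq]
    rw [hsnd, filt_map g l.count]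
    have hpk : (((rle T).map Prod.fst).filter g).Perm ((PySem.Set.ofList l).filter g) := by
      apply (List.perm_ext_iff_of_nodup (hnd.filter g) ((PySem.Set.nodup_ofList l).filter g)).mpr
      intro a
      simp only [List.mem_filter, mem_rle_keys, PySem.Set.mem_ofList]
      rw [hperm.mem_iff]
    exact ((hpk.map l.count).map Nat.factorial).prod_eq

theorem fact_prod_pos (ns : List Nat) : 0 < (ns.map Nat.factorial).prod := by
  apply List.prod_pos
  intro x hx
  obtain ⟨n, _, rfl⟩ := List.mem_map.mp hx
  exact Nat.factorial_pos n

theorem B_eval (S : String) :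
    solution_alt S =
      if ((Cc S.toList : Int) - (Vc S.toList : Int) = 0 ∨ (Cc S.toList : Int) - (Vc S.toList : Int) = 1) then
        PySem.Int.mod ((((Vc S.toList).factorial / Vd S.toList) * ((Cc S.toList).factorial / Cd S.toList) : Nat) : Int) pyMOD
      else 0 := by
  simp only [solution_alt]
  rw [sim (PySem.List.sorted S.toList (fun c => c) false)]
  have h00 : (((0 : Int)), ((0 : Int)), ((1 : Int)), ((1 : Int)))
      = ((((0 : Nat)) : Int), (((0 : Nat)) : Int), (((1 : Nat)) : Int), (((1 : Nat)) : Int)) := by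
    norm_num
  rw [h00, bump_split]
  obtain ⟨hv1, hv2⟩ := class_runs S.toList pv
  obtain ⟨hc1, hc2⟩ := class_runs S.toList (fun k => !pv k)
  obtain ⟨hv1', hv2'⟩ := combFold_spec
    (((rle (PySem.List.sorted S.toList (fun c => c) false)).filter (fun q => pv q.1)).map Prod.snd) 0 1
  obtain ⟨hc1', hc2'⟩ := combFold_spec
    (((rle (PySem.List.sorted S.toList (fun c => c) false)).filter (fun q => (!pv q.1))).map Prod.snd) 0 1
  simp only [Nat.zero_add, Nat.factorial_zero, Nat.one_mul, Nat.mul_one] at hv1' hv2' hc1' hc2'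
  rw [hv1] at hv1'
  rw [hv1, hv2] at hv2'
  rw [hc1] at hc1'
  rw [hc1, hc2] at hc2'
  have hVd : Vd S.toList = ((((PySem.Set.ofList S.toList).filter pv).map S.toList.count).map Nat.factorial).prod := rfl
  have hCd : Cd S.toList = ((((PySem.Set.ofList S.toList).filter (fun k => !pv k)).map S.toList.count).map Nat.factorial).prod := rfl
  have hVdpos : 0 < Vd S.toList := fact_prod_pos _
  have hCdpos : 0 < Cd S.toList := fact_prod_pos _
  have hva : ((((rle (PySem.List.sorted S.toList (fun c => c) false)).filter (fun q => pv q.1)).map Prod.snd).foldl combStep (0, 1)).2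
      = (Vc S.toList).factorial / Vd S.toList := by
    symm
    apply Nat.div_eq_of_eq_mul_left hVdpos
    unfold Vc
    rw [← hv2', hVd]
  have hca : ((((rle (PySem.List.sorted S.toList (fun c => c) false)).filter (fun q => (!pv q.1))).map Prod.snd).foldl combStep (0, 1)).2
      = (Cc S.toList).factorial / Cd S.toList := by
    symm
    apply Nat.div_eq_of_eq_mul_left hCdpos
    unfold Cc
    rw [← hc2', hCd]
  rw [hv1', hc1', hva, hca, Vc, Cc]
  push_cast
  rfl

-- ===== VERDICT (by name: the statement is the Claim_ definition above) =====
theorem solution_spec : Claim_equal_solution := by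
  intro S _
  unfold Spec_solution
  rw [A_eval, B_eval]
  by_cases hg : ((Cc S.toList : Int) - (Vc S.toList : Int) = 1 ∨ (Cc S.toList : Int) - (Vc S.toList : Int) = 0)
  · rw [if_pos hg, if_pos (by tauto)]
  · rw [if_neg hg, if_neg (by tauto)]
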